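-- pv_equiv track=rewrite | github.com/BaeJaejun/Algorithm_coding_test | 프로그래머스/1/82612. 부족한 금액 계산하기/부족한 금액 계산하기.py | solution
-- ===== SOURCE A (Python) =====
-- def solution(price, money, count):
--     answer = -1
--     p = 0
--     for i in range(1, count+1):
--         p += i * price
--
--     if money >= p:
--         answer = 0
--     else:
--         answer = p - money
--
--     return answer
-- ===== SOURCE B (Python) =====
-- def solution(price, money, count):
--     total = price * count * (count + 1) // 2
--     return max(total - money, 0)
-- ===== Notes on version B (the rewrite author's own statement) =====
-- stated objective: faster
-- what changed: Replaces the O(count) summation loop with the closed-form arithmetic series price*count*(count+1)//2 and an if-free max.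
-- outside the precondition, e.g. on solution(3, 0, -2): A returns 0, B returns 3
import Mathlib
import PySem

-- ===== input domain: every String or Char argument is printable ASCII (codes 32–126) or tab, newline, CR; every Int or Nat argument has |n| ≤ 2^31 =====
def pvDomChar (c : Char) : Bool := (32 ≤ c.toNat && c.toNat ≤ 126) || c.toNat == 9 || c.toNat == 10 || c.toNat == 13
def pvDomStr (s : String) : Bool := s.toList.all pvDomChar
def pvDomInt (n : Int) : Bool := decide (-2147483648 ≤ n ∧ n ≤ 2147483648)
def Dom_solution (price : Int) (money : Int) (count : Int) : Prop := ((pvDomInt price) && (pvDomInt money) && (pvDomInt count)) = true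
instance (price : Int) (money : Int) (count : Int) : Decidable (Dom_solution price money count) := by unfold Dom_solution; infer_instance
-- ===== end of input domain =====

-- B replaces A's O(count) summation loop with the closed-form arithmetic series (faster, asymptotic).

-- ===== PORT A =====
def solution (price : Int) (money : Int) (count : Int) : Int :=
  let p := (PySem.List.pyRange 1 (count + 1) 1).foldl (fun p i => p + i * price) 0
  if money ≥ p then 0 else p - money

-- ===== PORT B =====
def solution_alt (price : Int) (money : Int) (count : Int) : Int :=
  let total := PySem.Int.floordiv (price * count * (count + 1)) 2
  max (total - money) 0

-- ===== PRECONDITION & SPEC =====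
-- Pre_ excludes negative count (a ride COUNT is nonnegative by the problem's purpose); there A's
-- empty loop still returns a value (an accidental 0/negative-sum shortfall) that B's closed form does not reproduce.
def Pre_solution (price : Int) (money : Int) (count : Int) : Prop := 0 ≤ count
instance (price : Int) (money : Int) (count : Int) : Decidable (Pre_solution price money count) := by unfold Pre_solution; infer_instance
def pvWitness_solution : Int × Int × Int := (3, 20, 4)

def Spec_solution (price : Int) (money : Int) (count : Int) (out : Int) : Prop := out = solution_alt price money count
instance (price : Int) (money : Int) (count : Int) (out : Int) : Decidable (Spec_solution price money count out) := by unfold Spec_solution; infer_instance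

-- ===== CLAIM =====
def Claim_equal_solution : Prop := ∀ (price : Int) (money : Int) (count : Int), Dom_solution price money count → Pre_solution price money count → Spec_solution price money count (solution price money count)

-- ===== LEMMAS AND PROOFS =====
lemma two_mul_sumloop (price : Int) : ∀ n : Nat,
    2 * ((PySem.List.pyRange 1 ((n : Int) + 1) 1).foldl (fun p i => p + i * price) 0) = price * n * (n + 1) := by
  intro n
  induction n with
  | zero => norm_num [PySem.List.pyRange_one_eq_nil (le_refl (1:Int))]
  | succ n ih =>
    have hsplit : PySem.List.pyRange 1 (((n+1 : Nat) : Int) + 1) 1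
        = PySem.List.pyRange 1 ((n : Int) + 1) 1 ++ [(n : Int) + 1] := by
      push_cast
      have := PySem.List.pyRange_one_succ_right (a := 1) (b := (n : Int) + 1) (by omega)
      simpa using this
    rw [hsplit, List.foldl_append]
    simp only [List.foldl]
    push_cast
    push_cast at ih
    ring_nf
    ring_nf at ih
    linarith

theorem solution_spec_aux (price money count : Int) (h : 0 ≤ count) :
    solution price money count = solution_alt price money count := by
  obtain ⟨n, rfl⟩ : ∃ n : Nat, count = (n : Int) := ⟨count.toNat, (Int.toNat_of_nonneg h).symm⟩
  unfold solution solution_alt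
  have h2 := two_mul_sumloop price n
  set S := (PySem.List.pyRange 1 ((n : Int) + 1) 1).foldl (fun p i => p + i * price) 0 with hS
  have hfd : PySem.Int.floordiv (price * (n : Int) * ((n : Int) + 1)) 2 = S := by
    rw [PySem.Int.floordiv_eq_ediv_of_pos (by norm_num), ← h2,
      Int.mul_ediv_cancel_left _ (by norm_num : (2:Int) ≠ 0)]
  simp only [hfd]
  split_ifs with hmb <;> omega

-- ===== VERDICT =====
theorem solution_spec : Claim_equal_solution := by
  intro price money count _ hpre
  exact solution_spec_aux price money count hpre
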